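-- pv_equiv track=rewrite | github.com/pupatel/phasiRNAClassifier | Generate_Features.py | generatePositionalLabels
-- ===== SOURCE A (Python) =====
-- def generatePositionalLabels(size):
--
--     """Generates postional labels for a sequence, returns list of labels
--      Args:
--         Size: max size of sRNA seen in the postive and negative sets
--
--      Returns:
--         reutrns list of positional labels upto the size of the longest sequence
--
--      """
--
--
--     alphabets=['A','C','G','T']
--     n=0
--     i=1
--     position_labels=[]
--     while (n < len(alphabets)*size): #4*33=132
--
--         if(n%4==0):
--     #        print  i,alphabets[0],"->",master_positional_vector_phasiRNA[0][n]
--             label=str(i)+alphabets[0]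
--             position_labels.append(label)
--         elif(n%4==1):
--     #        print  i,alphabets[1],"->",master_positional_vector_phasiRNA[0][n]
--             label=str(i)+alphabets[1]
--             position_labels.append(label)
--         elif(n%4==2):
--     #        print  i,alphabets[2],"->",master_positional_vector_phasiRNA[0][n]
--             label=str(i)+alphabets[2]
--             position_labels.append(label)
--         elif(n%4==3):
--     #        print  i,alphabets[3],"->",master_positional_vector_phasiRNA[0][n]
--             label=str(i)+alphabets[3]
--             position_labels.append(label)
--         else:
--             continue
--
--         if (n%4==3):
--                 i+=1
--
--         n=n+1
--
--     return position_labels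
-- ===== SOURCE B (Python) =====
-- def generatePositionalLabels(size):
--     """Positional labels '1A','1C','1G','1T','2A',... up to `size` positions."""
--     position_labels = []
--     for i in range(1, size + 1):
--         for letter in ['A', 'C', 'G', 'T']:
--             position_labels.append(str(i) + letter)
--     return position_labels
-- ===== Notes on version B (the rewrite author's own statement) =====
-- stated objective: simpler
-- what changed: Two nested for-loops (positions 1..size, letters A/C/G/T) replace the flat while loop with a manual modular counter n%4, the four-way if/elif dispatch and the separately maintained position variable i.
import Mathlib
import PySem

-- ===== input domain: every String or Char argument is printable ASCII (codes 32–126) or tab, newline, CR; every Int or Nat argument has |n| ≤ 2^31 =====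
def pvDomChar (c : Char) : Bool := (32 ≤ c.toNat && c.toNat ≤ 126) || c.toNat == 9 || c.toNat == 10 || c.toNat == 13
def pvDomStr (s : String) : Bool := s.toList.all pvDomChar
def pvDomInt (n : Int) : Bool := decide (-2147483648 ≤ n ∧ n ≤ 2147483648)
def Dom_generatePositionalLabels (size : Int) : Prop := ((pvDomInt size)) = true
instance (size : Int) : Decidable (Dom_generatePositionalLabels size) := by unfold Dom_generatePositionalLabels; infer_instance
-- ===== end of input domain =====

-- B replaces A's flat while loop with n%4 dispatch and a manual position counter by two
-- nested loops over positions and letters (objective: simpler).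

-- ===== PORT A =====
-- the while loop: state n, i, position_labels.  The n%4 dispatch is the nested if below;
-- the trailing 'else: continue' of A is unreachable (n % 4 ∈ {0,1,2,3} since n ≥ 0), so the
-- final branch is the n%4==3 one.
def pvALoop (size n i : Int) (acc : List String) : List String :=
  if n < 4 * size then
    let label :=
      if PySem.Int.mod n 4 = 0 then PySem.Int.toStr i ++ "A"
      else if PySem.Int.mod n 4 = 1 then PySem.Int.toStr i ++ "C"
      else if PySem.Int.mod n 4 = 2 then PySem.Int.toStr i ++ "G"
      else PySem.Int.toStr i ++ "T"
    let acc' := acc ++ [label]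
    let i' := if PySem.Int.mod n 4 = 3 then i + 1 else i
    pvALoop size (n + 1) i' acc'
  else acc
termination_by (4 * size - n).toNat
decreasing_by omega

-- len(alphabets) * size = 4 * size
def generatePositionalLabels (size : Int) : List String :=
  pvALoop size 0 1 []

-- ===== PORT B =====
def generatePositionalLabels_alt (size : Int) : List String :=
  (PySem.List.pyRange 1 (size + 1) 1).foldl
    (fun acc i =>
      (["A", "C", "G", "T"] : List String).foldl
        (fun acc letter => acc ++ [PySem.Int.toStr i ++ letter]) acc)
    []

-- ===== PRECONDITION & SPEC =====
def Spec_generatePositionalLabels (size : Int) (out : List String) : Prop := out = generatePositionalLabels_alt size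
instance (size : Int) (out : List String) : Decidable (Spec_generatePositionalLabels size out) := by unfold Spec_generatePositionalLabels; infer_instance

-- ===== CLAIM (what is proved, stated in full; the proofs are below) =====
def Claim_equal_generatePositionalLabels : Prop := ∀ (size : Int), Dom_generatePositionalLabels size → Spec_generatePositionalLabels size (generatePositionalLabels size)

-- ===== LEMMAS AND PROOFS =====

-- one position's four labels
def pvBlock (i : Int) : List String :=
  [PySem.Int.toStr i ++ "A", PySem.Int.toStr i ++ "C", PySem.Int.toStr i ++ "G", PySem.Int.toStr i ++ "T"]

lemma pvALoop_step (size n i : Int) (acc : List String) (h4 : (4 : Int) ∣ n)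
    (hlt : n + 4 ≤ 4 * size) :
    pvALoop size n i acc = pvALoop size (n + 4) (i + 1) (acc ++ pvBlock i) := by
  have hpos : (0 : Int) < 4 := by norm_num
  have e0 : PySem.Int.mod n 4 = 0 := by rw [PySem.Int.mod_eq_emod_of_pos hpos]; omega
  have e1 : PySem.Int.mod (n + 1) 4 = 1 := by rw [PySem.Int.mod_eq_emod_of_pos hpos]; omega
  have e2 : PySem.Int.mod (n + 1 + 1) 4 = 2 := by rw [PySem.Int.mod_eq_emod_of_pos hpos]; omega
  have e3 : PySem.Int.mod (n + 1 + 1 + 1) 4 = 3 := by rw [PySem.Int.mod_eq_emod_of_pos hpos]; omega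
  rw [pvALoop]; simp only [if_pos (show n < 4 * size by omega), e0]
  rw [pvALoop]; simp only [if_pos (show n + 1 < 4 * size by omega), e1]
  rw [pvALoop]; simp only [if_pos (show n + 1 + 1 < 4 * size by omega), e2]
  rw [pvALoop]; simp only [if_pos (show n + 1 + 1 + 1 < 4 * size by omega), e3]
  have harg : n + 1 + 1 + 1 + 1 = n + 4 := by omega
  simp only [harg]
  norm_num [pvBlock, List.append_assoc]

lemma pvALoop_closed (size : Int) (m : ℕ) (i : Int) (acc : List String)
    (hm : 4 * (m : Int) ≤ 4 * size) :
    pvALoop size (4 * size - 4 * m) i acc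
      = acc ++ (List.range m).flatMap (fun j : ℕ => pvBlock (i + (j : Int))) := by
  induction m generalizing i acc with
  | zero =>
      rw [pvALoop]
      simp
  | succ k ih =>
      have hstep := pvALoop_step size (4 * size - 4 * (k + 1 : ℕ)) i acc
        (by push_cast; omega) (by push_cast at hm ⊢; omega)
      have harg : 4 * size - 4 * ((k + 1 : ℕ) : Int) + 4 = 4 * size - 4 * (k : ℕ) := by
        push_cast; omega
      rw [hstep, harg, ih (i + 1) (acc ++ pvBlock i) (by push_cast at hm ⊢; omega)]
      have hexp : (List.range (k + 1)).flatMap (fun j : ℕ => pvBlock (i + j))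
          = pvBlock i ++ (List.range k).flatMap (fun j : ℕ => pvBlock (i + 1 + j)) := by
        rw [List.range_succ_eq_map, List.flatMap_cons, List.flatMap_map]
        simp only [Nat.cast_zero, add_zero]
        congr 1
        refine List.flatMap_congr (fun j _ => ?_)
        congr 1
        push_cast
        ring
      rw [hexp, List.append_assoc]

lemma pvBLoop_closed (l : List Int) (acc : List String) :
    l.foldl (fun acc i =>
        (["A", "C", "G", "T"] : List String).foldl
          (fun acc letter => acc ++ [PySem.Int.toStr i ++ letter]) acc) acc
      = acc ++ l.flatMap pvBlock := by
  induction l generalizing acc with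
  | nil => simp
  | cons x xs ih =>
      rw [List.foldl_cons,
        show (["A", "C", "G", "T"] : List String).foldl
            (fun acc letter => acc ++ [PySem.Int.toStr x ++ letter]) acc = acc ++ pvBlock x from by
          simp [pvBlock],
        ih]
      simp

-- ===== VERDICT (by name: the statement is the Claim_ definition above) =====
theorem generatePositionalLabels_spec : Claim_equal_generatePositionalLabels := by
  intro size _
  unfold Spec_generatePositionalLabels generatePositionalLabels generatePositionalLabels_alt
  rw [pvBLoop_closed]
  by_cases hs : 0 ≤ size
  · have hrange : PySem.List.pyRange 1 (size + 1) 1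
        = (List.range (size.toNat)).map (fun k : ℕ => (1 : Int) + (k : Int)) := by
      rw [PySem.List.pyRange_one]
      norm_num
    have hn : (0 : Int) = 4 * size - 4 * ((size.toNat : ℕ) : Int) := by omega
    rw [hn, pvALoop_closed size size.toNat 1 [] (by omega), hrange]
    simp [List.flatMap_map]
  · have h1 : PySem.List.pyRange 1 (size + 1) 1 = [] :=
      PySem.List.pyRange_one_eq_nil (by omega)
    rw [pvALoop]
    simp [h1, show ¬ (0 : Int) < 4 * size by omega]
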